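-- pv_equiv track=rewrite | github.com/guoweier/JunD | scripts/module_seed_assembly.py | add_graph_overlap
-- ===== SOURCE A (Python) =====
-- def calculate_overlap(node1, node2):
--     """
--     Calculates the maximum overlap between two strings (nodes).
--     Args:
--         node1 (str): The first string.
--         node2 (str): The second string.
--     Returns:
--         int: The length of the maximum overlap.
--     """
--     max_overlap = 0
--     len1, len2 = len(node1), len(node2)
--     # Check suffix of node1 against prefix of node2
--     for i in range(1, min(len1, len2)+1):
--         if node1[-i:] == node2[:i]:
--             max_overlap = i
--     return max_overlap
--
-- def add_graph_overlap(graph):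
--     """
--     Add overlap value for each edge in simplified graph.
--     Args:
--         graph (dict): Directed graph represented as an adjacency list. Keys are nodes, values are lists of neighbors.
--     Returns:
--         graph (dict): Directed graph represented as an adjacency list. Keys are nodes, values are lists of (neighbor, overlap).
--     """
--     graph_overlap = {}
--     for node in graph:
--         for value in graph[node]:
--             overlap = calculate_overlap(node, value)
--             if node not in graph_overlap:
--                 graph_overlap[node] = []
--             graph_overlap[node] += [(value, overlap)]
--     return graph_overlap
-- ===== SOURCE B (Python) =====
-- def _overlap(node1, node2):
--     # longest suffix of node1 that is a prefix of node2: scan candidate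
--     # lengths downward and return the first (= largest) match
--     for i in reversed(range(1, min(len(node1), len(node2)) + 1)):
--         if node1[-i:] == node2[:i]:
--             return i
--     return 0
--
-- def add_graph_overlap(graph):
--     return {node: [(v, _overlap(node, v)) for v in vals]
--             for node, vals in graph.items() if vals}
-- ===== Notes on version B (the rewrite author's own statement) =====
-- stated objective: simpler
-- what changed: The mutating dict-building double loop with membership checks and per-edge list appends becomes a single dict comprehension over items() (keys with empty neighbour lists dropped by the 'if vals' filter), and the overlap search accumulates no running maximum: it scans candidate lengths downward and early-returns the first match.
import Mathlib
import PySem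

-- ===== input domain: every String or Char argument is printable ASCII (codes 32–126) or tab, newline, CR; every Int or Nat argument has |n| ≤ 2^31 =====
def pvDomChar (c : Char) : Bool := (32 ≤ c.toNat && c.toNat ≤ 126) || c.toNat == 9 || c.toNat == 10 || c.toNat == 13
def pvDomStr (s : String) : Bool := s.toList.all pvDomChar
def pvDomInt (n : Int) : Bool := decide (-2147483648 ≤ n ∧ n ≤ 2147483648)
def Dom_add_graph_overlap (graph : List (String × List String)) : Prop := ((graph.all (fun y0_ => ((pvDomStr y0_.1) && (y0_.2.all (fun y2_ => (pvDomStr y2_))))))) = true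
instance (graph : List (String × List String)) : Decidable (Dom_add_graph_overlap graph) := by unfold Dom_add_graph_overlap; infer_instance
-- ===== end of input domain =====

-- B replaces A's mutating dict-building double loop by a filter+map comprehension over the items
-- and finds the overlap by a downward scan with early return instead of a running maximum (objective: simpler).
-- Pre_ excludes association lists with duplicate keys: those cannot occur as a Python dict,
-- so the assoc-list reading of A's dict input is ambiguous there.


-- ===== PORT A =====
def calculate_overlap (node1 node2 : String) : Int :=
  let len1 : Int := PySem.Str.len node1
  let len2 : Int := PySem.Str.len node2
  (PySem.List.pyRange 1 (min len1 len2 + 1) 1).foldl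
    (fun max_overlap i =>
      if PySem.List.slice node1.toList (some (-i)) none == PySem.List.slice node2.toList none (some i)
      then i else max_overlap) 0

def add_graph_overlap (graph : List (String × List String)) : List (String × List (String × Int)) :=
  (graph.foldl
    (fun graph_overlap p =>
      ((PySem.Dict.mk graph).getD p.1 []).foldl
        (fun graph_overlap value =>
          let overlap := calculate_overlap p.1 value
          let g1 := if graph_overlap.contains p.1 then graph_overlap
                    else graph_overlap.insert p.1 []
          g1.modify p.1 [] (fun lst => lst ++ [(value, overlap)]))
        graph_overlap)
    PySem.Dict.empty).items

-- ===== PORT B =====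
def calculate_overlap_alt (node1 node2 : String) : Int :=
  (((PySem.List.pyRange 1 (min (PySem.Str.len node1) (PySem.Str.len node2) + 1) 1).reverse).find?
    (fun i => PySem.List.slice node1.toList (some (-i)) none == PySem.List.slice node2.toList none (some i))).getD 0

def add_graph_overlap_alt (graph : List (String × List String)) : List (String × List (String × Int)) :=
  (graph.filter (fun p => !p.2.isEmpty)).map
    (fun p => (p.1, p.2.map (fun v => (v, calculate_overlap_alt p.1 v))))

-- ===== PRECONDITION & SPEC =====
-- Pre_ excludes association lists with duplicate keys: a Python dict cannot hold them,
-- so A's behaviour on such an assoc list is not defined by the Python source.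
def Pre_add_graph_overlap (graph : List (String × List String)) : Prop :=
  (graph.map Prod.fst).Nodup
instance (graph : List (String × List String)) : Decidable (Pre_add_graph_overlap graph) := by unfold Pre_add_graph_overlap; infer_instance

def pvWitness_add_graph_overlap : (List (String × List String)) :=
  [("ab", ["ba", "b"]), ("c", [])]

def Spec_add_graph_overlap (graph : List (String × List String)) (out : List (String × List (String × Int))) : Prop := out = add_graph_overlap_alt graph
instance (graph : List (String × List String)) (out : List (String × List (String × Int))) : Decidable (Spec_add_graph_overlap graph out) := by unfold Spec_add_graph_overlap; infer_instance

-- ===== CLAIM (what is proved, stated in full; the proofs are below) =====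
def Claim_equal_add_graph_overlap : Prop := ∀ (graph : List (String × List String)), Dom_add_graph_overlap graph → Pre_add_graph_overlap graph → Spec_add_graph_overlap graph (add_graph_overlap graph)

-- ===== LEMMAS AND PROOFS =====

theorem contains_mk_iff (l : List (String × List (String × Int))) (node : String) :
    (PySem.Dict.mk l).contains node = true ↔ node ∈ l.map Prod.fst := by
  simp [PySem.Dict.contains, List.any_eq_true]

-- appending one edge to the list of a node that sits LAST in the dict, fresh in the rest
theorem step_mk (l : List (String × List (String × Int))) (node : String)
    (acc : List (String × Int)) (x : String × Int) (h : node ∉ l.map Prod.fst) :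
    ((PySem.Dict.mk (l ++ [(node, acc)])).modify node [] (fun lst => lst ++ [x])) =
      PySem.Dict.mk (l ++ [(node, acc ++ [x])]) := by
  have hc : (PySem.Dict.mk (l ++ [(node, acc)])).contains node = true := by
    simp [PySem.Dict.contains]
  have hg : (PySem.Dict.mk (l ++ [(node, acc)])).getD node [] = acc := by
    simp only [PySem.Dict.getD, PySem.Dict.get?, List.find?_append]
    rw [List.find?_eq_none.mpr]
    · simp
    · intro p hp
      simp only [beq_iff_eq]
      intro he; exact h (by simpa [he] using List.mem_map_of_mem (f := Prod.fst) hp)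
  simp only [PySem.Dict.modify, hg, PySem.Dict.insert, hc, if_pos]
  congr 1
  rw [List.map_append]
  congr 1
  · conv_rhs => rw [← List.map_id l]
    apply List.map_congr_left
    intro p hp
    have : ¬ (p.1 == node) = true := by
      simp only [beq_iff_eq]
      intro he; exact h (by simpa [he] using List.mem_map_of_mem (f := Prod.fst) hp)
    simp [this]
  · simp

-- A's inner loop ("for value in graph[node]") extends the row of a fresh node in place
theorem inner_fold_eq (node : String) :
    ∀ (vs : List String) (l : List (String × List (String × Int))) (acc : List (String × Int)),
      node ∉ l.map Prod.fst →
      (vs.foldl (fun graph_overlap value =>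
          (if graph_overlap.contains node then graph_overlap
           else graph_overlap.insert node []).modify node []
            (fun lst => lst ++ [(value, calculate_overlap node value)]))
        (PySem.Dict.mk (l ++ [(node, acc)]))) =
      PySem.Dict.mk (l ++ [(node, acc ++ vs.map (fun v => (v, calculate_overlap node v)))]) := by
  intro vs
  induction vs with
  | nil => intro l acc h; simp
  | cons v rest ih =>
      intro l acc h
      have hc : (PySem.Dict.mk (l ++ [(node, acc)])).contains node = true := by
        simp [PySem.Dict.contains]
      simp only [List.foldl_cons, hc, if_pos]
      rw [step_mk l node acc _ h]
      rw [ih l _ h]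
      simp

-- A's outer loop over the (Nodup-keyed) remaining entries appends exactly B's rows
theorem outer_fold_eq (G : List (String × List String)) :
    ∀ (t : List (String × List String)) (l : List (String × List (String × Int))),
      (t.map Prod.fst).Nodup →
      (∀ p ∈ t, p.1 ∉ l.map Prod.fst) →
      (∀ p ∈ t, (PySem.Dict.mk G).getD p.1 [] = p.2) →
      (t.foldl (fun graph_overlap p =>
          ((PySem.Dict.mk G).getD p.1 []).foldl
            (fun graph_overlap value =>
              (if graph_overlap.contains p.1 then graph_overlap
               else graph_overlap.insert p.1 []).modify p.1 []
                (fun lst => lst ++ [(value, calculate_overlap p.1 value)]))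
            graph_overlap)
        (PySem.Dict.mk l)).items =
      l ++ (t.filter (fun p => !p.2.isEmpty)).map
            (fun p => (p.1, p.2.map (fun v => (v, calculate_overlap p.1 v)))) := by
  intro t
  induction t with
  | nil => intro l _ _ _; simp
  | cons q t ih =>
      intro l hnd hf hg
      obtain ⟨node, vs⟩ := q
      rw [List.map_cons] at hnd
      obtain ⟨hhd, htl⟩ := List.nodup_cons.mp hnd
      have hgv : (PySem.Dict.mk G).getD node [] = vs := hg (node, vs) (by simp)
      have hnode : node ∉ l.map Prod.fst := hf (node, vs) (by simp)
      simp only [List.foldl_cons, hgv]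
      cases vs with
      | nil =>
          simp only [List.foldl_nil]
          rw [ih l htl (fun p hp => hf p (List.mem_cons_of_mem _ hp))
              (fun p hp => hg p (List.mem_cons_of_mem _ hp))]
          simp
      | cons v rest =>
          have hcf : (PySem.Dict.mk l).contains node = false := by
            rw [← Bool.not_eq_true, contains_mk_iff]; exact hnode
          have hins : (PySem.Dict.mk l).insert node ([] : List (String × Int)) =
              PySem.Dict.mk (l ++ [(node, [])]) := by
            simp [PySem.Dict.insert, hcf]
          simp only [List.foldl_cons, hcf, Bool.false_eq_true, if_false, hins]
          rw [step_mk l node [] _ hnode]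
          rw [inner_fold_eq node rest l _ hnode]
          have hl' : ∀ p ∈ t, p.1 ∉ (l ++ [(node, ([(v, calculate_overlap node v)] ++ rest.map (fun v => (v, calculate_overlap node v))))]).map Prod.fst := by
            intro p hp
            simp only [List.map_append, List.mem_append, List.map_cons, List.map_nil, List.mem_cons]
            rintro (h1 | h2)
            · exact hf p (List.mem_cons_of_mem _ hp) h1
            · rcases h2 with h2 | h2
              · exact hhd (by simpa [h2] using List.mem_map_of_mem (f := Prod.fst) hp)
              · simp at h2
          rw [List.nil_append, ih _ htl hl' (fun p hp => hg p (List.mem_cons_of_mem _ hp))]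
          simp

-- A's running "keep the last matching i" fold equals B's "first match of the reversed list"
theorem foldl_last_match (P : Int → Bool) (l : List Int) (acc : Int) :
    l.foldl (fun m i => if P i then i else m) acc = (l.reverse.find? P).getD acc := by
  induction l generalizing acc with
  | nil => simp
  | cons x t ih =>
      simp only [List.foldl_cons, List.reverse_cons, List.find?_append, ih]
      cases h : t.reverse.find? P with
      | some y => simp
      | none => cases hP : P x <;> simp [hP]

theorem calculate_overlap_eq (node1 node2 : String) :
    calculate_overlap node1 node2 = calculate_overlap_alt node1 node2 := by
  unfold calculate_overlap calculate_overlap_alt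
  rw [foldl_last_match]

-- ===== VERDICT (by name: the statement is the Claim_ definition above) =====
theorem add_graph_overlap_spec : Claim_equal_add_graph_overlap := by
  intro graph _ hpre
  unfold Spec_add_graph_overlap add_graph_overlap add_graph_overlap_alt
  have hnk : (PySem.Dict.mk graph).keys.Nodup := by
    simpa [PySem.Dict.keys] using hpre
  have hg : ∀ p ∈ graph, (PySem.Dict.mk graph).getD p.1 [] = p.2 := by
    intro p hp
    exact PySem.Dict.getD_of_mem_items (PySem.Dict.mk graph) (k := p.1) (v := p.2)
      (by simpa using hp) hnk []
  have h := outer_fold_eq graph graph [] hpre (by simp) hg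
  simp only [List.nil_append] at h
  simp only [PySem.Dict.empty]
  simp only [h]
  simp [calculate_overlap_eq]
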